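-- pv_equiv track=rewrite | github.com/koushik-git09/smart-job-matching-system | backend/routes/recruiter.py | _tokenize_title
-- ===== SOURCE A (Python) =====
-- def _norm_text(x: object) -> str:
--     return str(x or "").strip().lower()
--
-- def _tokenize_title(x: object) -> set[str]:
--     s = _norm_text(x)
--     if not s:
--         return set()
--     out: set[str] = set()
--     cur: list[str] = []
--     for ch in s:
--         if ch.isalnum():
--             cur.append(ch)
--         else:
--             if cur:
--                 out.add("".join(cur))
--                 cur = []
--     if cur:
--         out.add("".join(cur))
--     return {t for t in out if t}
-- ===== SOURCE B (Python) =====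
-- def _norm_text(x: object) -> str:
--     return str(x or "").strip().lower()
--
-- def _tokenize_title(x: object) -> set[str]:
--     s = _norm_text(x)
--     if not s:
--         return set()
--     cleaned = "".join(c if c.isalnum() else " " for c in s)
--     return set(cleaned.split())
-- ===== Notes on version B (the rewrite author's own statement) =====
-- stated objective: idiomatic
-- what changed: Replaces the explicit char-by-char state machine (current-token buffer, boundary flushing into a set) with a transform-then-split pipeline: map non-alphanumeric characters to spaces and let str.split() find the token boundaries.
import Mathlib
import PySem

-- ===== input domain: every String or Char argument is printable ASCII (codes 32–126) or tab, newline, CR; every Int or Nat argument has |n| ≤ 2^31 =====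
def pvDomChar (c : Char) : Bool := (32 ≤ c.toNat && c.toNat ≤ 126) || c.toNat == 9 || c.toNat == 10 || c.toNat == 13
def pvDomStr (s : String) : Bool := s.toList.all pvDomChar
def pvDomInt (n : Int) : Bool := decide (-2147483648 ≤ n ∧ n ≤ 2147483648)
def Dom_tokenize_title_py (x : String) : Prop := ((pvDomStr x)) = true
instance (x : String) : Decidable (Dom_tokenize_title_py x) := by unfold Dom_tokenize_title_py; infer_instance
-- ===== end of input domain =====

-- B replaces A's char-by-char state machine with a map-non-alnum-to-space then split() pipeline (idiomatic, same cost).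
-- Both programs return a Python set; the equality proved is about the PySem.Set value (distinct elements, first-insertion order).

-- ===== PORT A =====
-- shared helper: _norm_text (identical source in Source A and Source B): str(x or "").strip().lower()
def normText_py (x : String) : List Char :=
  PySem.Chars.lower (PySem.Chars.strip (if x == "" then "".toList else x.toList))

-- one step of A's for-loop over the state (out, cur)
def tokStepA (st : PySem.Set String × List Char) (ch : Char) : PySem.Set String × List Char :=
  if PySem.Chars.isalnum ch then (st.1, st.2 ++ [ch])
  else if !st.2.isEmpty then (PySem.Set.add st.1 (String.ofList st.2), []) else st

def tokenize_title_py (x : String) : List String :=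
  let s := normText_py x
  if s.isEmpty then []
  else
    let st := s.foldl tokStepA (PySem.Set.empty, [])
    let out := if !st.2.isEmpty then PySem.Set.add st.1 (String.ofList st.2) else st.1
    PySem.Set.ofList (out.filter (fun t => !(t == "")))

-- ===== PORT B =====
def tokenize_title_py_alt (x : String) : List String :=
  let s := normText_py x
  if s.isEmpty then []
  else
    let cleaned := s.map (fun c => if PySem.Chars.isalnum c then c else ' ')
    PySem.Set.ofList ((PySem.Chars.split₀ cleaned).map String.ofList)

-- ===== PRECONDITION & SPEC =====
def Spec_tokenize_title_py (x : String) (out : List String) : Prop := out = tokenize_title_py_alt x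
instance (x : String) (out : List String) : Decidable (Spec_tokenize_title_py x out) := by unfold Spec_tokenize_title_py; infer_instance

-- ===== CLAIM (what is proved, stated in full; the proofs are below) =====
def Claim_equal_tokenize_title_py : Prop := ∀ (x : String), Dom_tokenize_title_py x → Spec_tokenize_title_py x (tokenize_title_py x)

-- ===== LEMMAS AND PROOFS =====

lemma isspace_of_isalnum (c : Char) (h : PySem.Chars.isalnum c = true) :
    PySem.Chars.isspace c = false := by
  simp only [PySem.Chars.isalnum, PySem.Chars.isalpha, PySem.Chars.isdigit,
    PySem.Chars.isupper, PySem.Chars.islower, Bool.or_eq_true, Bool.and_eq_true,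
    decide_eq_true_eq] at h
  rw [Bool.eq_false_iff]
  intro hsp
  simp only [PySem.Chars.isspace, Bool.or_eq_true, Bool.and_eq_true, decide_eq_true_eq] at hsp
  -- Char ≤ is definitionally ≤ on toNat, so h restates over c.toNat
  have h1 : (65 ≤ c.toNat ∧ c.toNat ≤ 90 ∨ 97 ≤ c.toNat ∧ c.toNat ≤ 122) ∨
      48 ≤ c.toNat ∧ c.toNat ≤ 57 := h
  omega

lemma split₀_go_acc (s : List Char) : ∀ (cur : List Char) (acc : List (List Char)),
    PySem.Chars.split₀.go s cur acc = acc.reverse ++ PySem.Chars.split₀.go s cur [] := by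
  induction s with
  | nil =>
    intro cur acc
    simp [PySem.Chars.split₀.go]
    split_ifs <;> simp
  | cons c rest ih =>
    intro cur acc
    simp only [PySem.Chars.split₀.go]
    split_ifs with h1 h2
    · rw [ih [] acc]
    · rw [ih [] (cur.reverse :: acc), ih [] [cur.reverse]]
      simp
    · rw [ih (c :: cur) acc]

lemma split₀_go_ne_nil (s : List Char) : ∀ (cur : List Char) (acc : List (List Char)),
    (∀ w ∈ acc, w ≠ []) → ∀ w ∈ PySem.Chars.split₀.go s cur acc, w ≠ [] := by
  induction s with
  | nil =>
    intro cur acc hacc w hw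
    simp [PySem.Chars.split₀.go] at hw
    split_ifs at hw with h
    · exact hacc w (by simpa using hw)
    · simp at hw
      rcases hw with hw | hw
      · exact hacc w hw
      · subst hw; simpa [List.isEmpty_iff] using h
  | cons c rest ih =>
    intro cur acc hacc w hw
    simp only [PySem.Chars.split₀.go] at hw
    split_ifs at hw with h1 h2
    · exact ih [] acc hacc w hw
    · refine ih [] (cur.reverse :: acc) ?_ w hw
      intro v hv
      rcases hv with _ | hv
      · simpa [List.isEmpty_iff] using h2
      · exact hacc _ (by assumption)
    · exact ih (c :: cur) acc hacc w hw

lemma loopA_eq (s : List Char) : ∀ (out : PySem.Set String) (cur : List Char),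
    (let st := s.foldl tokStepA (out, cur);
     if !st.2.isEmpty then PySem.Set.add st.1 (String.ofList st.2) else st.1)
    = ((PySem.Chars.split₀.go (s.map (fun c => if PySem.Chars.isalnum c then c else ' '))
        cur.reverse []).map String.ofList).foldl PySem.Set.add out := by
  induction s with
  | nil =>
    intro out cur
    simp only [List.foldl_nil, List.map_nil, PySem.Chars.split₀.go]
    cases cur with
    | nil => simp
    | cons a l => simp
  | cons c rest ih =>
    intro out cur
    by_cases h : PySem.Chars.isalnum c = true
    · simp only [List.foldl_cons, List.map_cons, if_pos h, tokStepA, PySem.Chars.split₀.go,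
        isspace_of_isalnum c h]
      rw [ih out (cur ++ [c])]
      simp
    · have hsp : PySem.Chars.isspace ' ' = true := by decide
      simp only [List.foldl_cons, List.map_cons, tokStepA, if_neg h, PySem.Chars.split₀.go, hsp]
      cases cur with
      | nil =>
        simp only [List.isEmpty_nil, Bool.not_true, Bool.false_eq_true, if_false,
          List.reverse_nil]
        exact ih out []
      | cons a l =>
        simp only [List.isEmpty_cons, Bool.not_false]
        rw [show (a :: l).reverse.isEmpty = false by simp]
        simp only [Bool.false_eq_true, if_false, List.reverse_reverse]
        rw [split₀_go_acc _ [] [a :: l]]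
        simp only [List.reverse_cons, List.reverse_nil, List.nil_append]
        exact ih (PySem.Set.add out (String.ofList (a :: l))) []

lemma mk_ne_empty (w : List Char) (h : w ≠ []) : String.ofList w ≠ "" := by
  simp only [ne_eq, ← String.toList_inj, String.toList_ofList]
  exact h

-- ===== VERDICT (by name: the statement is the Claim_ definition above) =====
theorem tokenize_title_py_spec : Claim_equal_tokenize_title_py := by
  intro x _
  unfold Spec_tokenize_title_py tokenize_title_py tokenize_title_py_alt
  set s := normText_py x with hs
  by_cases he : s.isEmpty
  · simp [he]
  · simp only [he, Bool.false_eq_true, if_false]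
    have hmain := loopA_eq s PySem.Set.empty []
    simp only [List.reverse_nil] at hmain
    rw [hmain]
    set ws := PySem.Chars.split₀.go (s.map (fun c => if PySem.Chars.isalnum c then c else ' ')) [] [] with hws
    have hofl : (ws.map String.ofList).foldl PySem.Set.add PySem.Set.empty = PySem.Set.ofList (ws.map String.ofList) := rfl
    rw [hofl]
    have hnn : ∀ t ∈ PySem.Set.ofList (ws.map String.ofList), !(t == "") := by
      intro t ht
      have ht' : t ∈ ws.map String.ofList := by
        exact (PySem.Set.mem_ofList _ t).mp ht
      rcases List.mem_map.mp ht' with ⟨w, hw, rfl⟩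
      have : w ≠ [] := split₀_go_ne_nil _ [] [] (by simp) w hw
      simpa using mk_ne_empty w this
    rw [List.filter_eq_self.mpr hnn]
    exact PySem.Set.ofList_eq_self_of_nodup (PySem.Set.ofList (ws.map String.ofList))
      (PySem.Set.nodup_ofList (ws.map String.ofList))
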